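-- pv_equiv track=rewrite | github.com/BigAngryDinosaur/amazonoa | min_max_parcels/solution.py | minimize_maximum_parcels
-- ===== SOURCE A (Python) =====
-- from typing import List
--
-- def minimize_maximum_parcels(parcels: List[int], extra_parcels: int) -> int:
--     if not parcels:
--         return extra_parcels
--
--     mx = max(parcels)
--     for val in parcels:
--         extra_parcels -= mx - val
--         if extra_parcels <= 0:
--             return mx
--
--     return (
--         mx
--         + extra_parcels // len(parcels)
--         + (0 if extra_parcels % len(parcels) == 0 else 1)
--     )
-- ===== SOURCE B (Python) =====
-- def minimize_maximum_parcels(parcels, extra_parcels):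
--     if not parcels:
--         return extra_parcels
--
--     def capacity(m):
--         # parcels that can absorb extras up to level m
--         return sum(m - p for p in parcels if p < m)
--
--     # binary search the smallest feasible maximum level
--     lo = max(parcels)
--     hi = lo + max(extra_parcels, 0)
--     while lo < hi:
--         mid = (lo + hi) // 2
--         if capacity(mid) >= extra_parcels:
--             hi = mid
--         else:
--             lo = mid + 1
--     return lo
-- ===== Notes on version B (the rewrite author's own statement) =====
-- stated objective: alternative
-- what changed: Replaced A's greedy leveling loop (subtracting each gap to the max with early exit, then floor/ceil division of the leftover) by a binary search on the answer: the smallest level m at or above max(parcels) whose absorbing capacity sum(m - p for p < m) covers extra_parcels.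
import Mathlib
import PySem

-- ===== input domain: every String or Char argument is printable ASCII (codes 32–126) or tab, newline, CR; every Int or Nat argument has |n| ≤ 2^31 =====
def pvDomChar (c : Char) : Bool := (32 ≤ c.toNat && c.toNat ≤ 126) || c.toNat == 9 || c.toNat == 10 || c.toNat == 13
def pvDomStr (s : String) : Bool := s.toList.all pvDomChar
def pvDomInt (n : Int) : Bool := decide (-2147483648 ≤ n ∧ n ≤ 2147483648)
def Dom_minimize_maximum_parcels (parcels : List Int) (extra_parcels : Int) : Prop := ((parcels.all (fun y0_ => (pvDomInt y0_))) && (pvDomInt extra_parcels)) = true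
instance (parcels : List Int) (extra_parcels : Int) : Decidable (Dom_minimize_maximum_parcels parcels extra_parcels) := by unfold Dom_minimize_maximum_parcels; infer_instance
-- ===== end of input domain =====

-- B replaces A's greedy leveling loop by a binary search on the answer (an alternative algorithm of similar cost, not claimed faster).


-- ===== PORT A =====
-- the 'for val in parcels' loop with its early return; mx and n are the loop-invariant values
def pvALoop (mx n : Int) : List Int → Int → Int
  | [], extra =>
      mx + PySem.Int.floordiv extra n + (if PySem.Int.mod extra n = 0 then 0 else 1)
  | v :: vs, extra =>
      let e := extra - (mx - v)
      if e ≤ 0 then mx else pvALoop mx n vs e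

def minimize_maximum_parcels (parcels : List Int) (extra_parcels : Int) : Int :=
  match parcels with
  | [] => extra_parcels
  | p :: ps =>
      let mx := ((PySem.List.max? (p :: ps) (fun x => x)).getD 0)
      pvALoop mx ((p :: ps).length : Int) (p :: ps) extra_parcels

-- ===== PORT B =====
-- capacity(m) = sum(m - p for p in parcels if p < m)
def pvCapacity (parcels : List Int) (m : Int) : Int :=
  ((parcels.filter (fun p => p < m)).map (fun p => m - p)).sum

-- the 'while lo < hi' binary-search loop of Source B
def pvBSearch (parcels : List Int) (extra lo hi : Int) : Int :=
  if h : lo < hi then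
    let mid := PySem.Int.floordiv (lo + hi) 2
    if pvCapacity parcels mid ≥ extra then
      pvBSearch parcels extra lo mid
    else
      pvBSearch parcels extra (mid + 1) hi
  else lo
termination_by (hi - lo).toNat
decreasing_by
  · have hb := PySem.Int.floordiv_two_mid_bounds (le_of_lt h) -- lo ≤ mid ∧ mid ≤ hi
    have hlt : PySem.Int.floordiv (lo + hi) 2 < hi := by
      rw [PySem.Int.floordiv_lt_iff_lt_mul (by omega : (0:Int) < 2)]; omega
    omega
  · have hb := PySem.Int.floordiv_two_mid_bounds (le_of_lt h)
    omega

def minimize_maximum_parcels_alt (parcels : List Int) (extra_parcels : Int) : Int :=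
  match parcels with
  | [] => extra_parcels
  | p :: ps =>
      let lo := ((PySem.List.max? (p :: ps) (fun x => x)).getD 0)
      let hi := lo + max extra_parcels 0
      pvBSearch (p :: ps) extra_parcels lo hi

-- ===== PRECONDITION & SPEC =====
def Spec_minimize_maximum_parcels (parcels : List Int) (extra_parcels : Int) (out : Int) : Prop := out = minimize_maximum_parcels_alt parcels extra_parcels
instance (parcels : List Int) (extra_parcels : Int) (out : Int) : Decidable (Spec_minimize_maximum_parcels parcels extra_parcels out) := by unfold Spec_minimize_maximum_parcels; infer_instance

-- ===== CLAIM (what is proved, stated in full; the proofs are below) =====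
def Claim_equal_minimize_maximum_parcels : Prop := ∀ (parcels : List Int) (extra_parcels : Int), Dom_minimize_maximum_parcels parcels extra_parcels → Spec_minimize_maximum_parcels parcels extra_parcels (minimize_maximum_parcels parcels extra_parcels)

-- ===== LEMMAS AND PROOFS =====

-- the total gap of a suffix: Σ (mx - v)
def pvGap (mx : Int) (vs : List Int) : Int := (vs.map (fun v => mx - v)).sum

theorem pvGap_nil (mx : Int) : pvGap mx [] = 0 := rfl

theorem pvGap_cons (mx v : Int) (vs : List Int) :
    pvGap mx (v :: vs) = (mx - v) + pvGap mx vs := by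
  simp [pvGap]

theorem pvGap_nonneg (mx : Int) (vs : List Int) (h : ∀ v ∈ vs, v ≤ mx) :
    0 ≤ pvGap mx vs := by
  induction vs with
  | nil => simp [pvGap]
  | cons v vs ih =>
      have hv := h v (by simp)
      have := ih (fun x hx => h x (by simp [hx]))
      rw [pvGap_cons]; omega

theorem pvGap_eq (mx : Int) (vs : List Int) :
    pvGap mx vs = (vs.length : Int) * mx - vs.sum := by
  induction vs with
  | nil => simp [pvGap]
  | cons v vs ih => rw [pvGap_cons, ih]; simp [List.length_cons, List.sum_cons]; ring

-- A's loop computes the closed form, provided mx dominates vs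
theorem pvALoop_eq (mx n : Int) (vs : List Int) (extra : Int)
    (hmx : ∀ v ∈ vs, v ≤ mx) (hne : vs ≠ [] ∨ 0 < extra) :
    pvALoop mx n vs extra =
      if extra - pvGap mx vs ≤ 0 then mx
      else mx + PySem.Int.floordiv (extra - pvGap mx vs) n
              + (if PySem.Int.mod (extra - pvGap mx vs) n = 0 then 0 else 1) := by
  induction vs generalizing extra with
  | nil =>
      rcases hne with h | h
      · exact absurd rfl h
      · simp [pvALoop, pvGap_nil]
        intro hle; omega
  | cons v vs ih =>
      have hv : v ≤ mx := hmx v (by simp)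
      have hmx' : ∀ x ∈ vs, x ≤ mx := fun x hx => hmx x (by simp [hx])
      have hg := pvGap_nonneg mx vs hmx'
      simp only [pvALoop]
      by_cases he : extra - (mx - v) ≤ 0
      · rw [if_pos he, pvGap_cons, if_pos (by omega)]
      · rw [if_neg he]
        rcases vs with _ | ⟨w, ws⟩
        · rw [ih (extra - (mx - v)) hmx' (Or.inr (by omega))]
          have h2 : extra - (mx - v) - pvGap mx [] = extra - pvGap mx [v] := by
            rw [pvGap_cons]; ring
          rw [h2]
        · rw [ih (extra - (mx - v)) hmx' (Or.inl (by simp))]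
          have h2 : extra - (mx - v) - pvGap mx (w :: ws)
               = extra - pvGap mx (v :: w :: ws) := by
            rw [pvGap_cons mx v]; ring
          rw [h2]

-- capacity as a sum of clamped gaps over the whole list
theorem pvCapacity_eq_sum_max (l : List Int) (m : Int) :
    pvCapacity l m = (l.map (fun p => max (m - p) 0)).sum := by
  induction l with
  | nil => rfl
  | cons p ps ih =>
      by_cases h : p < m
      · simp [pvCapacity, List.filter_cons, h, List.map_cons] at ih ⊢
        rw [ih]; omega
      · simp [pvCapacity, List.filter_cons, h, List.map_cons] at ih ⊢
        rw [ih]; omega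

theorem pvCapacity_mono (l : List Int) {m1 m2 : Int} (h : m1 ≤ m2) :
    pvCapacity l m1 ≤ pvCapacity l m2 := by
  rw [pvCapacity_eq_sum_max, pvCapacity_eq_sum_max]
  induction l with
  | nil => simp
  | cons p ps ih =>
      simp only [List.map_cons, List.sum_cons]
      have : max (m1 - p) 0 ≤ max (m2 - p) 0 := by omega
      omega

-- above the maximum, capacity is linear
theorem pvCapacity_of_dom (l : List Int) (m : Int) (h : ∀ p ∈ l, p ≤ m) :
    pvCapacity l m = (l.length : Int) * m - l.sum := by
  rw [pvCapacity_eq_sum_max]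
  induction l with
  | nil => simp
  | cons p ps ih =>
      have hp := h p (by simp)
      have := ih (fun x hx => h x (by simp [hx]))
      simp only [List.map_cons, List.sum_cons, List.length_cons] at this ⊢
      have hmax : max (m - p) 0 = m - p := by omega
      rw [hmax, this]
      push_cast; ring

-- the binary search returns the least level ≥ lo with enough capacity
theorem pvBSearch_eq (l : List Int) (extra lo hi c : Int)
    (hlo : lo ≤ c) (hhi : c ≤ hi)
    (hc : extra ≤ pvCapacity l c)
    (hmin : ∀ m, lo ≤ m → m < c → pvCapacity l m < extra) :
    pvBSearch l extra lo hi = c := by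
  rw [pvBSearch]
  by_cases h : lo < hi
  · rw [dif_pos h]
    have hb := PySem.Int.floordiv_two_mid_bounds (le_of_lt h)
    have hmidlt : PySem.Int.floordiv (lo + hi) 2 < hi := by
      rw [PySem.Int.floordiv_lt_iff_lt_mul (by omega : (0:Int) < 2)]; omega
    set mid := PySem.Int.floordiv (lo + hi) 2 with hmiddef
    by_cases hP : pvCapacity l mid ≥ extra
    · rw [if_pos hP]
      have hcmid : c ≤ mid := by
        by_contra hcm
        exact absurd hP (by simpa using hmin mid hb.1 (by omega))
      exact pvBSearch_eq l extra lo mid c hlo hcmid hc hmin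
    · rw [if_neg hP]
      have hcm : mid < c := by
        by_contra hcm
        exact hP (le_trans hc (pvCapacity_mono l (by omega)))
      exact pvBSearch_eq l extra (mid + 1) hi c (by omega) hhi hc
        (fun m hm hmc => hmin m (by omega) hmc)
  · rw [dif_neg h]
    omega
termination_by (hi - lo).toNat
decreasing_by
  · omega
  · omega

-- ===== VERDICT (by name: the statement is the Claim_ definition above) =====
theorem minimize_maximum_parcels_spec : Claim_equal_minimize_maximum_parcels := by
  unfold Claim_equal_minimize_maximum_parcels
  intro parcels extra _
  unfold Spec_minimize_maximum_parcels
  cases parcels with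
  | nil => rfl
  | cons p ps =>
      simp only [minimize_maximum_parcels, minimize_maximum_parcels_alt]
      set l := p :: ps with hl
      set mx := ((PySem.List.max? l (fun x => x)).getD 0) with hmxdef
      have hsome : PySem.List.max? l (fun x => x) = some mx := by
        rw [hmxdef, hl, PySem.List.max?_id_cons]; rfl
      have hdom : ∀ v ∈ l, v ≤ mx := fun v hv =>
        PySem.List.max?_isMax hsome v hv
      set n : Int := (l.length : Int) with hndef
      have hn : 1 ≤ n := by rw [hndef, hl]; simp
      have hgap : pvGap mx l = n * mx - l.sum := pvGap_eq mx l
      have hgap0 : 0 ≤ pvGap mx l := pvGap_nonneg mx l hdom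
      rw [pvALoop_eq mx n l extra hdom (Or.inl (by rw [hl]; simp))]
      set rem := extra - pvGap mx l with hremdef
      by_cases hr : rem ≤ 0
      · -- answer is mx itself
        rw [if_pos hr]
        refine (pvBSearch_eq l extra mx (mx + max extra 0) mx (le_refl _) (by omega) ?_ ?_).symm
        · rw [pvCapacity_of_dom l mx hdom, ← hndef]; omega
        · intro m hm hmc; omega
      · rw [if_neg hr]
        set q := PySem.Int.floordiv rem n with hqdef
        set r := PySem.Int.mod rem n with hrdef
        have hdm : q * n + r = rem := PySem.Int.floordiv_mul_add_mod rem n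
        have hr0 : 0 ≤ r ∧ r < n := by
          rw [hrdef, PySem.Int.mod_eq_emod_of_pos (show (0:Int) < n by omega)]
          exact ⟨Int.emod_nonneg rem (by omega), Int.emod_lt_of_pos rem (by omega)⟩
        have hq0 : 0 ≤ q := by
          by_contra hq
          have h1 : q ≤ -1 := by omega
          have : q * n ≤ (-1) * n := mul_le_mul_of_nonneg_right h1 (by omega)
          omega
        set ind : Int := if r = 0 then 0 else 1 with hinddef
        have hind01 : (r = 0 ∧ ind = 0) ∨ (1 ≤ r ∧ ind = 1) := by
          by_cases hz : r = 0 <;> simp [hinddef, hz] <;> omega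
        set c := mx + q + ind with hcdef
        have hcap : pvCapacity l c = n * c - l.sum := by
          refine pvCapacity_of_dom l c (fun v hv => ?_)
          have := hdom v hv; omega
        have hqn : q ≤ q * n := by
          calc q = q * 1 := by ring
          _ ≤ q * n := mul_le_mul_of_nonneg_left hn hq0
        refine (pvBSearch_eq l extra mx (mx + max extra 0) c (by omega) ?_ ?_ ?_).symm
        · -- c ≤ hi : extra > 0 here so hi = mx + extra
          have hex : 0 < extra := by omega
          have : q + ind ≤ rem := by rcases hind01 with ⟨h1, h2⟩ | ⟨h1, h2⟩ <;> omega
          omega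
        · -- enough capacity at c
          rw [hcap]
          have hnc : n * c = n * mx + q * n + n * ind := by rw [hcdef]; ring
          have hni : r ≤ n * ind := by
            rcases hind01 with ⟨h1, h2⟩ | ⟨h1, h2⟩ <;> rw [h2] <;> omega
          omega
        · -- minimality below c
          intro m hm hmc
          have hcapm : pvCapacity l m = n * m - l.sum :=
            pvCapacity_of_dom l m (fun v hv => le_trans (hdom v hv) hm)
          rw [hcapm]
          rcases hind01 with ⟨h1, h2⟩ | ⟨h1, h2⟩
          · -- r = 0 : m - mx ≤ q - 1
            have hle : m - mx ≤ q - 1 := by omega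
            have : n * (m - mx) ≤ n * (q - 1) := mul_le_mul_of_nonneg_left hle (by omega)
            have hnm : n * (m - mx) = n * m - n * mx := by ring
            have hnq : n * (q - 1) = q * n - n := by ring
            omega
          · -- r ≥ 1 : m - mx ≤ q
            have hle : m - mx ≤ q := by omega
            have : n * (m - mx) ≤ n * q := mul_le_mul_of_nonneg_left hle (by omega)
            have hnm : n * (m - mx) = n * m - n * mx := by ring
            have hnq : n * q = q * n := by ring
            omega
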